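-- pv_equiv track=rewrite | github.com/guilherme-nsr/beecrowd-sol | 1848.py | traduzir_piscada
-- ===== SOURCE A (Python) =====
-- def traduzir_piscada(piscada):
--   somatorio = 0
--
--   for i in range(len(piscada)):
--     olho = piscada[i]
--
--     if olho == '-':
--       continue
--
--     if i == 0:
--       somatorio += 4
--     elif i == 1:
--       somatorio += 2
--     elif i == 2:
--       somatorio += 1
--
--   return somatorio
-- ===== SOURCE B (Python) =====
-- def traduzir_piscada(piscada):
--     bits = ''.join('0' if c == '-' else '1' for c in piscada[:3]).ljust(3, '0')
--     return int(bits, 2)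
-- ===== Notes on version B (the rewrite author's own statement) =====
-- stated objective: simpler
-- what changed: Replaced the positional if i==0/1/2 weighted accumulation loop over the whole string by building a 3-bit string from the first three characters ('0' for dash, '1' otherwise, right-padded) and converting it with int(bits, 2).
import Mathlib
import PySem

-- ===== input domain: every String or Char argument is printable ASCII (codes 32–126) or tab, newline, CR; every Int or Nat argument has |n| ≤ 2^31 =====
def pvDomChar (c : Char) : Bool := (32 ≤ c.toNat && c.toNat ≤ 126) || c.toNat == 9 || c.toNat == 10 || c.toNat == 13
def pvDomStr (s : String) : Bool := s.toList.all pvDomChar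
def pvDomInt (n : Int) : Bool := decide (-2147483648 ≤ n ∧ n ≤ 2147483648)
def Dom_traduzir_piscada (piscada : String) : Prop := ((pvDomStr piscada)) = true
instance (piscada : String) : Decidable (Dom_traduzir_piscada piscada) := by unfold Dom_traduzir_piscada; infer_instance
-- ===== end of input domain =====

-- B builds a 3-bit string (dash = 0, anything else = 1, right-padded) and converts it in base 2,
-- instead of A's index loop with positional if i==0/1/2 weights; return values are identical.

-- ===== PORT A =====
-- A's loop: for i in range(len(piscada)): olho = piscada[i]; skip '-', add 4/2/1 for i = 0/1/2.
def traduzirLoopA : List Char → Int → Int → Int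
  | [], _, somatorio => somatorio
  | olho :: rest, i, somatorio =>
      traduzirLoopA rest (i + 1)
        (if olho = '-' then somatorio
         else if i = 0 then somatorio + 4
         else if i = 1 then somatorio + 2
         else if i = 2 then somatorio + 1
         else somatorio)

def traduzir_piscada (piscada : String) : Int :=
  traduzirLoopA piscada.toList 0 0

-- ===== PORT B =====
-- bits = ''.join('0' if c == '-' else '1' for c in piscada[:3]).ljust(3, '0')
def traduzirBits (piscada : String) : List Char :=
  let b := (piscada.toList.take 3).map (fun c => if c = '-' then '0' else '1')
  b ++ List.replicate (3 - b.length) '0'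

-- int(bits, 2)
def traduzir_piscada_alt (piscada : String) : Int :=
  (traduzirBits piscada).foldl (fun acc c => 2 * acc + (if c = '1' then 1 else 0)) 0

-- ===== PRECONDITION & SPEC =====
def Spec_traduzir_piscada (piscada : String) (out : Int) : Prop := out = traduzir_piscada_alt piscada
instance (piscada : String) (out : Int) : Decidable (Spec_traduzir_piscada piscada out) := by unfold Spec_traduzir_piscada; infer_instance

-- ===== CLAIM (what is proved, stated in full; the proofs are below) =====
def Claim_equal_traduzir_piscada : Prop := ∀ (piscada : String), Dom_traduzir_piscada piscada → Spec_traduzir_piscada piscada (traduzir_piscada piscada)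

-- ===== LEMMAS AND PROOFS =====

-- Indices ≥ 3 contribute nothing in A's loop.
theorem traduzirLoopA_ge3 (l : List Char) (i s : Int) (h : 3 ≤ i) :
    traduzirLoopA l i s = s := by
  induction l generalizing i s with
  | nil => rfl
  | cons c rest ih =>
      simp only [traduzirLoopA]
      split_ifs with h1 h2 h3 h4 <;>
        first
        | exact ih _ _ (by omega)
        | (exfalso; omega)

-- A's loop equals B's base-2 conversion, as a statement about the character list.
set_option maxHeartbeats 2000000 in
theorem traduzir_key (l : List Char) :
    traduzirLoopA l 0 0 =
      ((l.take 3).map (fun c => if c = '-' then '0' else '1')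
        ++ List.replicate (3 - ((l.take 3).map (fun c => if c = '-' then '0' else '1')).length) '0').foldl
        (fun acc c => 2 * acc + (if c = '1' then 1 else 0)) 0 := by
  match l with
  | [] => rfl
  | [a] =>
      simp only [traduzirLoopA, List.take, List.map, List.length, List.replicate,
        List.cons_append, List.nil_append, List.foldl]
      split_ifs <;> simp_all
  | [a, b] =>
      simp only [traduzirLoopA, List.take, List.map, List.length, List.replicate,
        List.cons_append, List.nil_append, List.foldl]
      split_ifs <;> simp_all
  | a :: b :: c :: rest =>
      show traduzirLoopA (a :: b :: c :: rest) 0 0 = _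
      simp only [traduzirLoopA, List.take_succ_cons, List.take_zero, List.map,
        List.length, List.replicate, List.cons_append, List.nil_append, List.foldl,
        List.append_nil]
      rw [traduzirLoopA_ge3 _ _ _ (by norm_num)]
      split_ifs <;> simp_all

-- ===== VERDICT (by name: the statement is the Claim_ definition above) =====
theorem traduzir_piscada_spec : Claim_equal_traduzir_piscada := by
  intro piscada _
  unfold Spec_traduzir_piscada traduzir_piscada traduzir_piscada_alt traduzirBits
  exact traduzir_key piscada.toList
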